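-- pv_equiv track=rewrite | github.com/Fu-Quant/Quant | Quant/factor_mining/genetics.py | get_cross_list
-- ===== SOURCE A (Python) =====
-- def get_cross_list(formula_list, target_index):
--     i = 0
--     cross_list = [target_index]
--     while True:
--         if cross_list[-1] * 2 + 1 > len(formula_list):
--             return cross_list
--             break
--         left_cross_list = [cross_list[x] * 2 for x in range(-2**i, 0)]
--         right_cross_list = [cross_list[x] * 2 + 1 for x in range(-2**i, 0)]
--         cross_list += left_cross_list + right_cross_list
--         cross_list = sorted(cross_list)
--         i += 1
-- ===== SOURCE B (Python) =====
-- def get_cross_list(formula_list, target_index):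
--     n = len(formula_list)
--     result = []
--     d = 0
--     while True:
--         lo = target_index * 2 ** d
--         result += range(lo, lo + 2 ** d)
--         if (lo + 2 ** d - 1) * 2 + 1 > n:
--             return sorted(result)
--         d += 1
-- ===== Notes on version B (the rewrite author's own statement) =====
-- stated objective: simpler
-- what changed: B computes each descendant level in closed form as range(target*2**d, target*2**d + 2**d) from a depth counter, appends the levels and sorts once at the end, instead of A's data-dependent frontier doubling via negative-index comprehensions over the accumulated list with a full re-sort every iteration.
-- intended difference: For target_index == 0 with len(formula_list) >= 7 (a degenerate root that is its own left child) A's sorted tail stops coinciding with the deepest level, so it re-doubles stale duplicates and returns e.g. [0,0,0,1,1,2,2,2,3,3,3,4,5,6,7]; B returns the sorted union of the per-depth descendant ranges [0,0,0,0,1,1,1,2,2,3,3,4,5,6,7], the intended descendant multiset. — e.g. on get_cross_list([0, 0, 0, 0, 0, 0, 0], 0): A returns [0, 0, 0, 1, 1, 2, 2, 2, 3, 3, 3, 4, 5, 6, 7], B returns [0, 0, 0, 0, 1, 1, 1, 2, 2, 3, 3, 4, 5, 6, 7]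
import Mathlib
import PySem

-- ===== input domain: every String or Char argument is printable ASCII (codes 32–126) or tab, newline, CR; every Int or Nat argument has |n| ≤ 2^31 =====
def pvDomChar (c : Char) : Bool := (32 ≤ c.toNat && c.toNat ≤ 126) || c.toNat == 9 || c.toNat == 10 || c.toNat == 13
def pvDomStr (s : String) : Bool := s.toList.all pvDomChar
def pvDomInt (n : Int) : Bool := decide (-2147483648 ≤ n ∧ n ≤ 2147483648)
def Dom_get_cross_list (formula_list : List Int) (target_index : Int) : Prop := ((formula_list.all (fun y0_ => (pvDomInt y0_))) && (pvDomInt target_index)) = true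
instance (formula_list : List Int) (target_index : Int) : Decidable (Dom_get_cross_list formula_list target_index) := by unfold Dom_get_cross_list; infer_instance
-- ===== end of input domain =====

-- B replaces A's frontier-doubling-with-resort by closed-form per-depth ranges with one final sort;
-- equivalence is about return values (neither function mutates its arguments).

-- ===== PORT A =====
-- A's while-loop as fuel recursion; the fuel (length + 2) exceeds the iterations A performs on
-- every input where A terminates (target_index ≥ 0, see Pre_); the fuel-out / none branches
-- return the current list and are never reached under Pre_.
-- [cross_list[x] for x in range(-2**i, 0)]: each xs[x] via PySem.List.pyGet? (none = IndexError,
-- unreachable: the list always holds at least 2^i elements).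
def pyACompL (cl : List Int) (i : Nat) : Option (List Int) :=
  (PySem.List.pyRange (-(2 ^ i : Int)) 0).mapM (fun x => (PySem.List.pyGet? cl x).map (fun v => v * 2))
def pyACompR (cl : List Int) (i : Nat) : Option (List Int) :=
  (PySem.List.pyRange (-(2 ^ i : Int)) 0).mapM (fun x => (PySem.List.pyGet? cl x).map (fun v => v * 2 + 1))
def aLoop (n : Int) : Nat → List Int → Nat → List Int
  | 0, cl, _ => cl
  | fuel+1, cl, i =>
    match PySem.List.pyGet? cl (-1) with
    | none => cl
    | some last =>
      if last * 2 + 1 > n then cl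
      else
        match pyACompL cl i, pyACompR cl i with
        | some l, some r => aLoop n fuel (PySem.List.sorted (cl ++ (l ++ r)) id false) (i+1)
        | _, _ => cl
def get_cross_list (formula_list : List Int) (target_index : Int) : List Int :=
  aLoop (formula_list.length : Int) (formula_list.length + 2) [target_index] 0

-- ===== PORT B =====
def bLoop (n : Int) (t : Int) : Nat → List Int → Nat → List Int
  | 0, res, _ => PySem.List.sorted res id false
  | fuel+1, res, d =>
    let lo := t * 2 ^ d
    let res2 := res ++ PySem.List.pyRange lo (lo + 2 ^ d)
    if (lo + 2 ^ d - 1) * 2 + 1 > n then PySem.List.sorted res2 id false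
    else bLoop n t fuel res2 (d+1)
def get_cross_list_alt (formula_list : List Int) (target_index : Int) : List Int :=
  bLoop (formula_list.length : Int) target_index (formula_list.length + 2) [] 0

-- ===== PRECONDITION & SPEC =====
-- Pre_ excludes target_index < 0, on which the Python A (and B) loops forever: every list element
-- stays negative, so cross_list[-1]*2+1 > len(formula_list) never holds.
def Pre_get_cross_list (_formula_list : List Int) (target_index : Int) : Prop := 0 ≤ target_index
instance (formula_list : List Int) (target_index : Int) : Decidable (Pre_get_cross_list formula_list target_index) := by unfold Pre_get_cross_list; infer_instance
def pvWitness_get_cross_list : List Int × Int := ([0, 0, 0], 1)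

-- For target_index == 0 with len(formula_list) ≥ 7 (a degenerate root that is its own left child)
-- A's sorted tail stops coinciding with the deepest level, so it re-doubles stale duplicates
-- (e.g. [0,0,0,1,1,2,2,2,3,3,3,4,5,6,7]); B returns the sorted union of the per-depth descendant
-- ranges (e.g. [0,0,0,0,1,1,1,2,2,3,3,4,5,6,7]), the intended descendant multiset.
def D_get_cross_list (formula_list : List Int) (target_index : Int) : Prop :=
  target_index = 0 ∧ 7 ≤ formula_list.length
instance (formula_list : List Int) (target_index : Int) : Decidable (D_get_cross_list formula_list target_index) := by unfold D_get_cross_list; infer_instance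

def Spec_get_cross_list (formula_list : List Int) (target_index : Int) (out : List Int) : Prop := ¬ D_get_cross_list formula_list target_index → out = get_cross_list_alt formula_list target_index
instance (formula_list : List Int) (target_index : Int) (out : List Int) : Decidable (Spec_get_cross_list formula_list target_index out) := by unfold Spec_get_cross_list; infer_instance

def pvDiffWitness_get_cross_list : List Int × Int := ([0, 0, 0, 0, 0, 0, 0], 0)
def pvDiffWitnessOut_get_cross_list : (List Int) × (List Int) :=
  ([0, 0, 0, 1, 1, 2, 2, 2, 3, 3, 3, 4, 5, 6, 7], [0, 0, 0, 0, 1, 1, 1, 2, 2, 3, 3, 4, 5, 6, 7])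

-- ===== CLAIM (what is proved, stated in full; the proofs are below) =====
def Claim_unchanged_get_cross_list : Prop := ∀ (formula_list : List Int) (target_index : Int), Dom_get_cross_list formula_list target_index → Pre_get_cross_list formula_list target_index → Spec_get_cross_list formula_list target_index (get_cross_list formula_list target_index)
def Claim_exact_get_cross_list : Prop := ∀ (formula_list : List Int) (target_index : Int), Dom_get_cross_list formula_list target_index → Pre_get_cross_list formula_list target_index → D_get_cross_list formula_list target_index → get_cross_list formula_list target_index ≠ get_cross_list_alt formula_list target_index
def Claim_changed_get_cross_list : Prop := Dom_get_cross_list (pvDiffWitness_get_cross_list.1) (pvDiffWitness_get_cross_list.2) ∧ Pre_get_cross_list (pvDiffWitness_get_cross_list.1) (pvDiffWitness_get_cross_list.2) ∧ D_get_cross_list (pvDiffWitness_get_cross_list.1) (pvDiffWitness_get_cross_list.2) ∧ get_cross_list (pvDiffWitness_get_cross_list.1) (pvDiffWitness_get_cross_list.2) = pvDiffWitnessOut_get_cross_list.1 ∧ get_cross_list_alt (pvDiffWitness_get_cross_list.1) (pvDiffWitness_get_cross_list.2) = pvDiffWitnessOut_get_cross_list.2 ∧ pvDiffWitnessOut_get_cross_list.1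 ≠ pvDiffWitnessOut_get_cross_list.2

-- ===== LEMMAS AND PROOFS =====

def lvl (t : Int) (d : Nat) : List Int := PySem.List.pyRange (t * 2 ^ d) (t * 2 ^ d + 2 ^ d)

def stkB (t : Int) : Nat → List Int
  | 0 => []
  | k+1 => stkB t k ++ lvl t k

theorem length_lvl (t : Int) (d : Nat) : (lvl t d).length = 2 ^ d := by
  have h : (t * 2 ^ d + 2 ^ d - t * 2 ^ d : Int) = ((2 ^ d : Nat) : Int) := by push_cast; ring
  rw [lvl, PySem.List.length_pyRange_one, h, Int.toNat_natCast]

theorem mem_lvl {t : Int} {d : Nat} {x : Int} : x ∈ lvl t d ↔ t * 2 ^ d ≤ x ∧ x < t * 2 ^ d + 2 ^ d := by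
  simp [lvl, PySem.List.mem_pyRange_one]

theorem last_lvl (t : Int) (d : Nat) : (lvl t d).getLast? = some (t * 2 ^ d + 2 ^ d - 1) := by
  have h2 : (0:Int) < 2 ^ d := by positivity
  have h : t * 2 ^ d + 2 ^ d = (t * 2 ^ d + 2 ^ d - 1) + 1 := by ring
  rw [lvl]
  conv_lhs => rw [h, PySem.List.pyRange_one_succ_right (by omega)]
  simp

theorem last_stkB (t : Int) (k : Nat) :
    PySem.List.pyGet? (stkB t (k+1)) (-1) = some (t * 2 ^ k + 2 ^ k - 1) := by
  rw [PySem.List.pyGet?_neg_one, stkB, List.getLast?_append]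
  simp [last_lvl]

theorem pairwise_stkB (t : Int) (ht : 1 ≤ t) (k : Nat) :
    (stkB t k).Pairwise (· < ·) ∧ ∀ x ∈ stkB t k, x < t * 2 ^ k := by
  induction k with
  | zero => simp [stkB]
  | succ k ih =>
    obtain ⟨hp, hb⟩ := ih
    have h2 : (0:Int) < 2 ^ k := by positivity
    have hmul : (2:Int) ^ k ≤ t * 2 ^ k := le_mul_of_one_le_left (le_of_lt h2) ht
    constructor
    · rw [stkB, List.pairwise_append]
      refine ⟨hp, ?_, ?_⟩
      · simpa [lvl] using PySem.List.pairwise_lt_pyRange_one (t * 2 ^ k) (t * 2 ^ k + 2 ^ k)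
      · intro x hx y hy
        have := hb x hx
        have := (mem_lvl.mp hy).1
        omega
    · intro x hx
      rw [stkB, List.mem_append] at hx
      have hpow : t * 2 ^ (k+1) = t * 2 ^ k + t * 2 ^ k := by ring
      rcases hx with hx | hx
      · have := hb x hx; omega
      · have := (mem_lvl.mp hx).2; omega

theorem sorted_stkB (t : Int) (ht : 1 ≤ t) (k : Nat) :
    PySem.List.sorted (stkB t k) id false = stkB t k := by
  exact PySem.List.sorted_eq_of_perm_of_pairwise_lt _ _ _ (List.Perm.refl _) (pairwise_stkB t ht k).1

theorem mapM_tail (f : Int → Int) : ∀ (suf pre : List Int),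
    (PySem.List.pyRange (-(suf.length : Int)) 0).mapM
      (fun x => (PySem.List.pyGet? (pre ++ suf) x).map f) = some (suf.map f) := by
  intro suf
  induction suf with
  | nil => intro pre; simp [PySem.List.pyRange_one_eq_nil]
  | cons s rest ih =>
    intro pre
    have hm : -(((s :: rest).length : Nat) : Int) = -(((rest.length + 1 : Nat)) : Int) := by simp
    rw [hm, PySem.List.pyRange_one_cons (by push_cast; omega)]
    have hget : PySem.List.pyGet? (pre ++ s :: rest) (-((rest.length + 1 : Nat) : Int)) = some s := by
      rw [PySem.List.pyGet?_neg_natCast _ _ (by omega) (by simp)]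
      have : (pre ++ s :: rest).length - (rest.length + 1) = pre.length := by simp
      rw [this]
      simp
    have hsplit : pre ++ s :: rest = (pre ++ [s]) ++ rest := by simp
    have hstep : (-((rest.length + 1 : Nat) : Int) + 1) = -((rest.length : Nat) : Int) := by push_cast; ring
    rw [List.mapM_cons, hget, hstep, hsplit, ih (pre ++ [s])]
    simp

theorem comp_lvl (f : Int → Int) (t : Int) (k : Nat) :
    (PySem.List.pyRange (-(2 ^ k : Int)) 0).mapM
      (fun x => (PySem.List.pyGet? (stkB t (k+1)) x).map f) = some ((lvl t k).map f) := by
  have hlen : -((2:Int) ^ k) = -(((lvl t k).length : Nat) : Int) := by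
    rw [length_lvl]; push_cast; ring
  rw [hlen, stkB, mapM_tail]

theorem perm_double : ∀ (m : Nat) (c : Int),
    (PySem.List.pyRange (2*c) (2*c + 2*(m:Int))).Perm
      ((PySem.List.pyRange c (c + (m:Int))).map (fun v => v * 2) ++
       (PySem.List.pyRange c (c + (m:Int))).map (fun v => v * 2 + 1)) := by
  intro m
  induction m with
  | zero => intro c; simp [PySem.List.pyRange_one_eq_nil]
  | succ m ih =>
    intro c
    have e1 : 2*c + 2*((m+1 : Nat):Int) = (2*c + 2*(m:Int) + 1) + 1 := by push_cast; ring
    have e2 : 2*c + 2*(m:Int) + 1 = (2*c + 2*(m:Int)) + 1 := by ring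
    have e3 : c + ((m+1 : Nat):Int) = (c + (m:Int)) + 1 := by push_cast; ring
    rw [e1, PySem.List.pyRange_one_succ_right (by omega), e2,
        PySem.List.pyRange_one_succ_right (by omega),
        e3, PySem.List.pyRange_one_succ_right (by omega)]
    simp only [List.map_append, List.map_cons, List.map_nil]
    have e4 : (c + (m:Int)) * 2 = 2*c + 2*(m:Int) := by ring
    have e5 : (c + (m:Int)) * 2 + 1 = 2*c + 2*(m:Int) + 1 := by ring
    rw [e4]
    have ihc := List.perm_iff_count.mp (ih c)
    rw [List.perm_iff_count]
    intro a
    simp only [List.count_append, ihc a]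
    omega

theorem lvl_perm (t : Int) (k : Nat) :
    (lvl t (k+1)).Perm ((lvl t k).map (fun v => v * 2) ++ (lvl t k).map (fun v => v * 2 + 1)) := by
  have e1 : t * 2 ^ (k+1) = 2 * (t * 2 ^ k) := by ring
  have e2 : t * 2 ^ (k+1) + 2 ^ (k+1) = 2 * (t * 2 ^ k) + 2 * ((2 ^ k : Nat) : Int) := by
    push_cast; ring
  have e3 : t * 2 ^ k + 2 ^ k = t * 2 ^ k + ((2 ^ k : Nat) : Int) := by push_cast; ring
  rw [lvl, lvl, e2, e1, e3]
  exact perm_double (2 ^ k) (t * 2 ^ k)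

theorem sorted_step (t : Int) (ht : 1 ≤ t) (k : Nat) :
    PySem.List.sorted (stkB t (k+1) ++ ((lvl t k).map (fun v => v * 2) ++ (lvl t k).map (fun v => v * 2 + 1))) id false
      = stkB t (k+2) := by
  refine PySem.List.sorted_eq_of_perm_of_pairwise_lt _ _ _ ?_ (pairwise_stkB t ht (k+2)).1
  show (stkB t (k+2)).Perm _
  rw [show stkB t (k+2) = stkB t (k+1) ++ lvl t (k+1) from rfl]
  exact List.Perm.append_left _ (lvl_perm t k)

theorem lockstep (n t : Int) (ht : 1 ≤ t) : ∀ fuel k,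
    (∃ j, j < fuel ∧ (t * 2 ^ (k + j) + 2 ^ (k + j) - 1) * 2 + 1 > n) →
    aLoop n fuel (stkB t (k+1)) k = bLoop n t fuel (stkB t k) k := by
  intro fuel
  induction fuel with
  | zero => rintro k ⟨j, hj, -⟩; omega
  | succ fuel ih =>
    intro k hex
    have hres : stkB t k ++ PySem.List.pyRange (t * 2 ^ k) (t * 2 ^ k + 2 ^ k) = stkB t (k+1) := rfl
    simp only [aLoop, bLoop, last_stkB, hres]
    by_cases hc : (t * 2 ^ k + 2 ^ k - 1) * 2 + 1 > n
    · simp only [if_pos hc, sorted_stkB t ht]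
    · simp only [if_neg hc]
      have hL : pyACompL (stkB t (k+1)) k = some ((lvl t k).map (fun v => v * 2)) := comp_lvl _ t k
      have hR : pyACompR (stkB t (k+1)) k = some ((lvl t k).map (fun v => v * 2 + 1)) := comp_lvl _ t k
      simp only [hL, hR, sorted_step t ht k]
      obtain ⟨j, hj, hgt⟩ := hex
      have hj0 : j ≠ 0 := by rintro rfl; simp at hgt; omega
      obtain ⟨j', rfl⟩ := Nat.exists_eq_succ_of_ne_zero hj0
      have := ih (k+1) ⟨j', by omega, by rw [show k + 1 + j' = k + (j'+1) from by omega]; exact hgt⟩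
      exact this

theorem main_pos (formula_list : List Int) (t : Int) (ht : 1 ≤ t) :
    get_cross_list formula_list t = get_cross_list_alt formula_list t := by
  have h1 : stkB t 1 = [t] := by
    simp [stkB, lvl, pow_zero, mul_one, PySem.List.pyRange_one_singleton]
  have h0 : stkB t 0 = [] := rfl
  rw [get_cross_list, get_cross_list_alt, ← h1, ← h0]
  refine lockstep _ t ht _ 0 ⟨formula_list.length, by omega, ?_⟩
  have hp : ((formula_list.length : Int)) < 2 ^ formula_list.length := by
    exact_mod_cast Nat.lt_two_pow_self
  have h2 : (0:Int) < 2 ^ formula_list.length := by positivity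
  have h3 : (2:Int) ^ formula_list.length ≤ t * 2 ^ formula_list.length :=
    le_mul_of_one_le_left (le_of_lt h2) ht
  simp only [Nat.zero_add]
  omega

theorem main_zero (formula_list : List Int) (h : formula_list.length ≤ 6) :
    get_cross_list formula_list 0 = get_cross_list_alt formula_list 0 := by
  obtain ⟨m, hm⟩ : ∃ m, formula_list.length = m := ⟨_, rfl⟩
  rw [get_cross_list, get_cross_list_alt, hm]
  rw [hm] at h
  interval_cases m <;> decide

-- invariant of A's loop at target 0 once i ≥ 2: sorted, nonnegative, length 2^(i+1)-1, exactly three 0s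
def Pz (i : Nat) (s : List Int) : Prop :=
  s.Pairwise (· ≤ ·) ∧ (∀ x ∈ s, 0 ≤ x) ∧ s.length = 2^(i+1) - 1 ∧ List.count 0 s = 3

theorem tail_pos {s : List Int} {k : Nat} (hp : s.Pairwise (· ≤ ·)) (hn : ∀ x ∈ s, 0 ≤ x)
    (hc : List.count 0 s = 3) (hk : 3 ≤ k) : ∀ x ∈ s.drop k, 1 ≤ x := by
  intro x hx
  by_contra hlt
  have hx0 : x = 0 := le_antisymm (by omega) (hn x (List.mem_of_mem_drop hx))
  subst hx0
  obtain ⟨j, hj, hje⟩ := List.mem_iff_getElem.mp hx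
  have hlen : k + j < s.length := by
    have h' := hj
    rw [List.length_drop] at h'
    omega
  have hjs : (s.drop k)[j] = s[k + j]'hlen := by
    simp [List.getElem_drop]
  have hall : ∀ j' (hj' : j' < k + j + 1), s[j']'(by omega) = 0 := by
    intro j' hj'
    have hle : s[j']'(by omega) ≤ s[k+j]'(hlen) := by
      rcases Nat.lt_or_ge j' (k+j) with h | h
      · exact (List.pairwise_iff_getElem.mp hp) j' (k+j) (by omega) hlen h
      · have : j' = k + j := by omega
        subst this; exact le_refl _
    have hge : 0 ≤ s[j']'(by omega) := hn _ (List.getElem_mem _)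
    have : s[k+j]'(hlen) = 0 := by rw [← hjs]; simpa using hje
    omega
  have htake : List.count 0 (s.take (k+j+1)) = k+j+1 := by
    rw [List.count_eq_length.mpr, List.length_take_of_le (by omega)]
    intro b hb
    obtain ⟨j', hj', hje'⟩ := List.mem_iff_getElem.mp hb
    have : j' < k+j+1 := by simp [List.length_take] at hj'; omega
    rw [List.getElem_take] at hje'
    rw [← hje', hall j' this]
  have hsplit : List.count 0 s = List.count 0 (s.take (k+j+1)) + List.count 0 (s.drop (k+j+1)) := by
    rw [← List.count_append, List.take_append_drop]
  omega

theorem comp_some (s : List Int) (i : Nat) (h : 2^i ≤ s.length) :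
    pyACompL s i = some ((s.drop (s.length - 2^i)).map (fun v => v * 2)) ∧
    pyACompR s i = some ((s.drop (s.length - 2^i)).map (fun v => v * 2 + 1)) := by
  have hlen : (s.drop (s.length - 2^i)).length = 2^i := by
    rw [List.length_drop]
    exact Nat.sub_sub_self h
  have hcast : -((2:Int) ^ i) = -(((s.drop (s.length - 2^i)).length : Nat) : Int) := by
    rw [hlen]; push_cast; ring
  constructor
  · have key := mapM_tail (fun v => v * 2) (s.drop (s.length - 2^i)) (s.take (s.length - 2^i))
    rw [List.take_append_drop] at key
    rw [pyACompL, hcast]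
    exact key
  · have key := mapM_tail (fun v => v * 2 + 1) (s.drop (s.length - 2^i)) (s.take (s.length - 2^i))
    rw [List.take_append_drop] at key
    rw [pyACompR, hcast]
    exact key

theorem Pz_step (i : Nat) (s : List Int) (hP : Pz i s) (hi : 2 ≤ i) :
    Pz (i+1) (PySem.List.sorted (s ++ ((s.drop (s.length - 2^i)).map (fun v => v * 2) ++
      (s.drop (s.length - 2^i)).map (fun v => v * 2 + 1))) id false) := by
  obtain ⟨hp, hn, hl, hc⟩ := hP
  have h1 : (1:Nat) ≤ 2^i := Nat.one_le_two_pow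
  have hpow1 : (2:Nat)^(i+1) = 2 * 2^i := by ring
  have hpow2 : (2:Nat)^(i+2) = 4 * 2^i := by ring
  have h2le : 2^i ≤ s.length := by omega
  have hdroplen : (s.drop (s.length - 2^i)).length = 2^i := by rw [List.length_drop]; omega
  have hk3 : 3 ≤ s.length - 2^i := by
    have : (4:Nat) ≤ 2^i := by
      calc (4:Nat) = 2^2 := by norm_num
        _ ≤ 2^i := Nat.pow_le_pow_right (by norm_num) hi
    omega
  have htail : ∀ x ∈ s.drop (s.length - 2^i), 1 ≤ x := tail_pos hp hn hc hk3
  refine ⟨?_, ?_, ?_, ?_⟩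
  · simpa using PySem.List.sorted_pairwise (s ++ _) id
  · intro x hx
    rw [PySem.List.mem_sorted] at hx
    rcases List.mem_append.mp hx with hx | hx
    · exact hn x hx
    · rcases List.mem_append.mp hx with hx | hx
      · obtain ⟨v, hv, rfl⟩ := List.mem_map.mp hx
        have := htail v hv; omega
      · obtain ⟨v, hv, rfl⟩ := List.mem_map.mp hx
        have := htail v hv; omega
  · rw [PySem.List.length_sorted]
    simp only [List.length_append, List.length_map, List.length_drop]
    omega
  · rw [(PySem.List.sorted_perm _ _ _).count_eq]
    rw [List.count_append, List.count_append]
    have hzl : List.count 0 ((s.drop (s.length - 2^i)).map (fun v => v * 2)) = 0 := by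
      rw [List.count_eq_zero]
      intro hmem
      obtain ⟨v, hv, he⟩ := List.mem_map.mp hmem
      have := htail v hv; omega
    have hzr : List.count 0 ((s.drop (s.length - 2^i)).map (fun v => v * 2 + 1)) = 0 := by
      rw [List.count_eq_zero]
      intro hmem
      obtain ⟨v, hv, he⟩ := List.mem_map.mp hmem
      omega
    omega

theorem countA (n : Int) : ∀ fuel (i : Nat) (s : List Int), Pz i s → 2 ≤ i →
    List.count 0 (aLoop n fuel s i) = 3 := by
  intro fuel
  induction fuel with
  | zero => intro i s hP _; exact hP.2.2.2
  | succ fuel ih =>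
    intro i s hP hi
    have h2le : 2^i ≤ s.length := by
      have h1 : (1:Nat) ≤ 2^i := Nat.one_le_two_pow
      have : (2:Nat)^(i+1) = 2*2^i := by ring
      have := hP.2.2.1
      omega
    obtain ⟨hL, hR⟩ := comp_some s i h2le
    simp only [aLoop]
    cases hget : PySem.List.pyGet? s (-1) with
    | none => exact hP.2.2.2
    | some last =>
      by_cases hcond : last * 2 + 1 > n
      · simp only [if_pos hcond]; exact hP.2.2.2
      · simp only [if_neg hcond, hL, hR]
        exact ih (i+1) _ (Pz_step i s hP hi) (by omega)

theorem count_lvl_zero (d : Nat) : List.count 0 (PySem.List.pyRange (0 * 2^d) (0 * 2^d + 2^d)) = 1 := by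
  have h2 : (0:Int) < 2^d := by positivity
  rw [zero_mul, zero_add, PySem.List.pyRange_one_cons (by omega)]
  rw [List.count_cons]
  have : List.count 0 (PySem.List.pyRange 1 (2^d)) = 0 := by
    rw [List.count_eq_zero]
    intro hmem
    have := (PySem.List.mem_pyRange_one.mp hmem).1
    omega
  simp [this]

theorem countB (n : Int) : ∀ fuel (res : List Int) (d : Nat), 1 ≤ fuel →
    List.count 0 res + 1 ≤ List.count 0 (bLoop n 0 fuel res d) := by
  intro fuel
  induction fuel with
  | zero => intro _ _ h; omega
  | succ fuel ih =>
    intro res d _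
    simp only [bLoop]
    have hcnt : List.count 0 (res ++ PySem.List.pyRange (0 * 2^d) (0 * 2^d + 2^d))
        = List.count 0 res + 1 := by
      rw [List.count_append, count_lvl_zero]
    by_cases hcond : (0 * 2^d + 2^d - 1) * 2 + 1 > n
    · simp only [if_pos hcond]
      rw [(PySem.List.sorted_perm _ _ _).count_eq, hcnt]
    · simp only [if_neg hcond]
      cases fuel with
      | zero =>
        simp only [bLoop]
        rw [(PySem.List.sorted_perm _ _ _).count_eq, hcnt]
      | succ fuel' =>
        have := ih (res ++ PySem.List.pyRange (0 * 2^d) (0 * 2^d + 2^d)) (d+1) (by omega)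
        omega

theorem peelA (n : Int) (hn : 7 ≤ n) (fuel : Nat) :
    aLoop n (fuel+2) [0] 0 = aLoop n fuel [0,0,0,1,1,2,3] 2 := by
  have g1 : PySem.List.pyGet? [(0:Int)] (-1) = some 0 := by decide
  have c1 : pyACompL [(0:Int)] 0 = some [0] := by decide
  have d1 : pyACompR [(0:Int)] 0 = some [1] := by decide
  have s1 : PySem.List.sorted ([(0:Int)] ++ ([0] ++ [1])) id false = [0,0,1] := by decide
  have g2 : PySem.List.pyGet? [(0:Int),0,1] (-1) = some 1 := by decide
  have c2 : pyACompL [(0:Int),0,1] 1 = some [0,2] := by decide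
  have d2 : pyACompR [(0:Int),0,1] 1 = some [1,3] := by decide
  have s2 : PySem.List.sorted ([(0:Int),0,1] ++ ([0,2] ++ [1,3])) id false = [0,0,0,1,1,2,3] := by decide
  simp only [aLoop, g1, c1, d1, s1, g2, c2, d2, s2, if_neg (by omega : ¬ ((0:Int) * 2 + 1 > n)),
    if_neg (by omega : ¬ ((1:Int) * 2 + 1 > n))]

theorem peelB (n : Int) (hn : 7 ≤ n) (fuel : Nat) :
    bLoop n 0 (fuel+3) [] 0 = bLoop n 0 fuel [0,0,1,0,1,2,3] 3 := by
  have r0 : PySem.List.pyRange ((0:Int) * 2^0) (0 * 2^0 + 2^0) = [0] := by decide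
  have r1 : PySem.List.pyRange ((0:Int) * 2^1) (0 * 2^1 + 2^1) = [0,1] := by decide
  have r2 : PySem.List.pyRange ((0:Int) * 2^2) (0 * 2^2 + 2^2) = [0,1,2,3] := by decide
  simp only [bLoop, r0, r1, r2,
    if_neg (by omega : ¬ (((0:Int) * 2^0 + 2^0 - 1) * 2 + 1 > n)),
    if_neg (by omega : ¬ (((0:Int) * 2^1 + 2^1 - 1) * 2 + 1 > n)),
    if_neg (by omega : ¬ (((0:Int) * 2^2 + 2^2 - 1) * 2 + 1 > n))]
  rfl

theorem tight_core (formula_list : List Int) (h7 : 7 ≤ formula_list.length) :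
    get_cross_list formula_list 0 ≠ get_cross_list_alt formula_list 0 := by
  have hn : (7:Int) ≤ (formula_list.length : Int) := by exact_mod_cast h7
  obtain ⟨m, hm⟩ : ∃ m, formula_list.length = m + 7 := ⟨formula_list.length - 7, by omega⟩
  have hn' : (7:Int) ≤ ((m + 7 : Nat) : Int) := by push_cast; omega
  have hA : List.count 0 (get_cross_list formula_list 0) = 3 := by
    rw [get_cross_list, hm, peelA ((m + 7 : Nat) : Int) hn' (m + 7)]
    exact countA _ _ 2 _ ⟨by decide, by decide, by decide, by decide⟩ (le_refl 2)
  have hB : 4 ≤ List.count 0 (get_cross_list_alt formula_list 0) := by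
    rw [get_cross_list_alt, hm, show m + 7 + 2 = (m + 6) + 3 from by omega,
      peelB ((m + 7 : Nat) : Int) hn' (m + 6)]
    have := countB ((m + 7 : Nat) : Int) (m+6) [0,0,1,0,1,2,3] 3 (by omega)
    have hc : List.count (0:Int) [0,0,1,0,1,2,3] = 3 := by decide
    omega
  intro h
  rw [h] at hA
  omega

-- ===== VERDICT (by name: the statement is the Claim_ definition above) =====
theorem get_cross_list_spec : Claim_unchanged_get_cross_list := by
  intro fl t _ hpre hnd
  rcases lt_or_ge 0 t with h1 | h1
  · exact main_pos fl t h1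
  · have ht0 : t = 0 := le_antisymm h1 hpre
    subst ht0
    have hlen : fl.length ≤ 6 := by
      by_contra h
      exact hnd ⟨rfl, by omega⟩
    exact main_zero fl hlen

theorem get_cross_list_changed : Claim_changed_get_cross_list := by
  unfold Claim_changed_get_cross_list; decide

theorem get_cross_list_tight : Claim_exact_get_cross_list := by
  intro formula_list target_index _ _ hD
  obtain ⟨ht0, h7⟩ := hD
  subst ht0
  exact tight_core formula_list h7
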